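-- pv_equiv track=rewrite | github.com/TG-Lim/Algorithm_interview | baekjoon/20437.py | solution
-- ===== SOURCE A (Python) =====
-- from typing import List
-- from collections import defaultdict
--
-- def solution(W: str, K: int) -> List[int]:
--     counter = defaultdict(list)
--     for i, string in enumerate(W):
--         counter[string].append(i)
--     answer = []
--
--     third_answer = 10001
--     fourth_answer = 0
--     for value in counter.values():
--         if len(value) < K: # 조건 만족 못함
--             continue
--
--         for i in range(len(value)-(K)+1):
--             length = value[i+K-1] - value[i] + 1
--             third_answer = min(third_answer, length)
--             fourth_answer = max(length, fourth_answer)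
--
--     if third_answer == 10001:
--         answer.append(-1)
--     else:
--         answer.append(third_answer)
--
--     if fourth_answer == 0:
--         answer.append(-1)
--     else:
--         answer.append(fourth_answer)
--
--     if answer[0] == -1 and answer[1] == -1:
--         return [-1]
--     else:
--         return answer
-- ===== SOURCE B (Python) =====
-- from typing import List
-- from collections import deque
--
-- def solution(W: str, K: int) -> List[int]:
--     # single fused pass: per-char sliding deque of the last K occurrence indices
--     window = {}
--     best_min, best_max = 10001, 0
--     for i, ch in enumerate(W):
--         w = window.setdefault(ch, deque())
--         w.append(i)
--         if len(w) > K: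
--             w.popleft()
--         if len(w) == K:
--             length = i - w[0] + 1
--             if length < best_min:
--                 best_min = length
--             if best_max < length:
--                 best_max = length
--     first = -1 if best_min == 10001 else best_min
--     second = -1 if best_max == 0 else best_max
--     return [-1] if first == -1 and second == -1 else [first, second]
-- ===== Notes on version B (the rewrite author's own statement) =====
-- stated objective: alternative
-- what changed: Replaces the two-phase 'build full per-char position table, then rescan every K-window of every list' with one fused online pass that keeps only a bounded deque of each character's last K occurrence indices and folds each completed window length into running min/max as it appears.
import Mathlib
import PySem

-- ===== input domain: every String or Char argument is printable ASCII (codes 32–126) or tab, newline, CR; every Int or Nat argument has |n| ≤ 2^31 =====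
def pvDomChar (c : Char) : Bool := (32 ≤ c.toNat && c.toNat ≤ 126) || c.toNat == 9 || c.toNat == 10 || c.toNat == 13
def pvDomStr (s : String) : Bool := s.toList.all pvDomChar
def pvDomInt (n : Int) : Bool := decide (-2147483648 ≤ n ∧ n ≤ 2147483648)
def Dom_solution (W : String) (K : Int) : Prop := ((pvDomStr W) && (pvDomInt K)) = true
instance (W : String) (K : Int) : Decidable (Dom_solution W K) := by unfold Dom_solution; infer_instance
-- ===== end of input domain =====

-- B replaces A's two-phase "build the full per-character position table, then rescan every
-- K-window of every list" by one fused online pass keeping, per character, only a deque of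
-- its last K occurrence indices (objective: alternative decomposition, same asymptotic cost).

-- ===== PORT A =====
def solution (W : String) (K : Int) : List Int :=
  let counter : PySem.Dict Char (List Int) :=
    (PySem.List.enumerate W.toList 0).foldl
      (fun d p => d.modify p.2 [] (fun v => v ++ [p.1])) PySem.Dict.empty
  let tf : Int × Int :=
    counter.values.foldl
      (fun tf value =>
        if (value.length : Int) < K then tf
        else
          (PySem.List.pyRange 0 ((value.length : Int) - K + 1) 1).foldl
            (fun tf i =>
              (min tf.1 (PySem.List.pyGetD value (i + K - 1) 0 - PySem.List.pyGetD value i 0 + 1),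
               max (PySem.List.pyGetD value (i + K - 1) 0 - PySem.List.pyGetD value i 0 + 1) tf.2))
            tf)
      (10001, 0)
  let a0 : Int := if tf.1 = 10001 then -1 else tf.1
  let a1 : Int := if tf.2 = 0 then -1 else tf.2
  if a0 = -1 ∧ a1 = -1 then [-1] else [a0, a1]

-- ===== PORT B =====
def solution_alt (W : String) (K : Int) : List Int :=
  let st : PySem.Dict Char (List Int) × Int × Int :=
    (PySem.List.enumerate W.toList 0).foldl
      (fun s p =>
        let w0 := s.1.getD p.2 [] ++ [p.1]
        let w := if K < (w0.length : Int) then w0.tail else w0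
        if (w.length : Int) = K then
          (s.1.insert p.2 w,
           (if p.1 - PySem.List.pyGetD w 0 0 + 1 < s.2.1 then p.1 - PySem.List.pyGetD w 0 0 + 1 else s.2.1),
           (if s.2.2 < p.1 - PySem.List.pyGetD w 0 0 + 1 then p.1 - PySem.List.pyGetD w 0 0 + 1 else s.2.2))
        else (s.1.insert p.2 w, s.2.1, s.2.2))
      (PySem.Dict.empty, 10001, 0)
  let first : Int := if st.2.1 = 10001 then -1 else st.2.1
  let second : Int := if st.2.2 = 0 then -1 else st.2.2
  if first = -1 ∧ second = -1 then [-1] else [first, second]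

-- ===== PRECONDITION & SPEC =====
-- Pre_ excludes exactly the inputs on which A raises: for K ≤ 0 and nonempty W the inner
-- window scan reaches value[len(value)] (IndexError); A returns normally iff W = "" or K ≥ 1.
def Pre_solution (W : String) (K : Int) : Prop := W = "" ∨ 1 ≤ K
instance (W : String) (K : Int) : Decidable (Pre_solution W K) := by unfold Pre_solution; infer_instance

def pvWitness_solution : String × Int := ("aabbaa", 2)

def Spec_solution (W : String) (K : Int) (out : List Int) : Prop := out = solution_alt W K
instance (W : String) (K : Int) (out : List Int) : Decidable (Spec_solution W K out) := by unfold Spec_solution; infer_instance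

-- ===== CLAIM (what is proved, stated in full; the proofs are below) =====
def Claim_equal_solution : Prop := ∀ (W : String) (K : Int), Dom_solution W K → Pre_solution W K → Spec_solution W K (solution W K)

-- ===== LEMMAS AND PROOFS =====

-- the common min/max folding step (A folds it grouped by character, B in completion order)
def pvG : Int × Int → Int → Int × Int := fun t x => (min t.1 x, max t.2 x)

-- the k-window lengths of one position list, in A's (start-index) order
def pvWins (k : Nat) (v : List Int) : List Int :=
  (List.range (v.length + 1 - k)).map (fun i => v.getD (i + k - 1) 0 - v.getD i 0 + 1)

-- positions of character c recorded by the pair list P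
def pvPos (P : List (Int × Char)) (c : Char) : List Int :=
  (P.filter (fun p => p.2 == c)).map (fun p => p.1)

-- all window lengths, grouped by character in first-occurrence order (A's traversal order)
def pvAll (k : Nat) (P : List (Int × Char)) : List Int :=
  (PySem.Set.ofList (P.map (fun p => p.2))).flatMap (fun c => pvWins k (pvPos P c))

-- B's per-character deque: the last k recorded positions
def pvLastk (k : Nat) (v : List Int) : List Int := v.drop (v.length - k)

-- B's loop body, named so the invariant below can speak about it (definitionally the
-- lambda inside solution_alt)
def pvStepB (K : Int) (s : PySem.Dict Char (List Int) × Int × Int) (p : Int × Char) :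
    PySem.Dict Char (List Int) × Int × Int :=
  let w0 := s.1.getD p.2 [] ++ [p.1]
  let w := if K < (w0.length : Int) then w0.tail else w0
  if (w.length : Int) = K then
    (s.1.insert p.2 w,
     (if p.1 - PySem.List.pyGetD w 0 0 + 1 < s.2.1 then p.1 - PySem.List.pyGetD w 0 0 + 1 else s.2.1),
     (if s.2.2 < p.1 - PySem.List.pyGetD w 0 0 + 1 then p.1 - PySem.List.pyGetD w 0 0 + 1 else s.2.2))
  else (s.1.insert p.2 w, s.2.1, s.2.2)

theorem pvWins_append (k : Nat) (hk : 1 ≤ k) (v : List Int) (i : Int) :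
    pvWins k (v ++ [i]) =
      pvWins k v ++
        (if k ≤ v.length + 1 then [i - (v ++ [i]).getD (v.length + 1 - k) 0 + 1] else []) := by
  by_cases hle : k ≤ v.length + 1
  · have h1 : (v ++ [i]).length + 1 - k = (v.length + 1 - k) + 1 := by simp; omega
    rw [if_pos hle]
    simp only [pvWins, h1, List.range_succ, List.map_append, List.map_cons, List.map_nil]
    congr 1
    · apply List.map_congr_left
      intro j hj
      rw [List.mem_range] at hj
      have e1 : (v ++ [i]).getD (j + k - 1) 0 = v.getD (j + k - 1) 0 := by
        rw [List.getD_append _ _ _ _ (by omega)]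
      have e2 : (v ++ [i]).getD j 0 = v.getD j 0 := by
        rw [List.getD_append _ _ _ _ (by omega)]
      rw [e1, e2]
    · have e3 : v.length + 1 - k + k - 1 = v.length := by omega
      rw [e3]
      have e4 : (v ++ [i]).getD v.length 0 = i := by
        simp [List.getD]
      rw [e4]
  · have h2 : v.length + 1 - k = 0 := by omega
    simp [pvWins, h2, hle]
    omega

theorem pvPos_append (P : List (Int × Char)) (i : Int) (c c' : Char) :
    pvPos (P ++ [(i, c)]) c' = if c' = c then pvPos P c' ++ [i] else pvPos P c' := by
  by_cases h : c' = c
  · simp [pvPos, List.filter_append, h]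
  · simp only [pvPos, List.filter_append, if_neg h]
    have : ((i, c).2 == c') = false := by
      simp only [beq_eq_false_iff_ne]; exact fun hh => h hh.symm
    simp [this]

theorem pvPos_nil_of_not_mem (P : List (Int × Char)) (c : Char)
    (h : c ∉ P.map (fun p => p.2)) : pvPos P c = [] := by
  simp only [List.mem_map, not_exists, not_and] at h
  simp only [pvPos, List.map_eq_nil_iff, List.filter_eq_nil_iff]
  intro p hp
  simpa using fun hc => h p hp hc

theorem pvLastk_append (k : Nat) (hk : 1 ≤ k) (v : List Int) (i : Int) :
    (if (k : Int) < ((pvLastk k v ++ [i]).length : Int) then (pvLastk k v ++ [i]).tail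
     else pvLastk k v ++ [i]) = pvLastk k (v ++ [i]) := by
  by_cases hv : v.length < k
  · have h1 : v.length - k = 0 := by omega
    have h2 : (v ++ [i]).length - k = 0 := by simp; omega
    simp only [pvLastk, h1, h2, List.drop_zero]
    rw [if_neg]
    simp
    omega
  · have hlen : (pvLastk k v).length = k := by simp [pvLastk]; omega
    have hcond : (k : Int) < ((pvLastk k v ++ [i]).length : Int) := by simp [hlen]
    rw [if_pos hcond]
    have hne : pvLastk k v ≠ [] := by
      intro h; rw [h] at hlen; simp at hlen; omega
    rw [List.tail_append_of_ne_nil hne]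
    have h3 : (v ++ [i]).length - k = (v.length - k) + 1 := by simp; omega
    simp only [pvLastk, List.tail_drop, h3]
    rw [List.drop_append_of_le_length (by omega)]

-- replacing one block of a keyed flatMap by itself plus a suffix is, up to permutation,
-- appending that suffix at the end
theorem pv_flatMap_perm (keys : List Char) (hnd : keys.Nodup) (f f' : Char → List Int)
    (c : Char) (hc : c ∈ keys) (hsame : ∀ c', c' ≠ c → f' c' = f c') (δ : List Int)
    (hδ : f' c = f c ++ δ) : (keys.flatMap f').Perm (keys.flatMap f ++ δ) := by
  induction keys with
  | nil => cases hc
  | cons a ks ih =>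
    rcases List.nodup_cons.mp hnd with ⟨ha, hnd'⟩
    by_cases hac : a = c
    · subst hac
      have hks : ks.flatMap f' = ks.flatMap f :=
        List.flatMap_congr (fun x hx => hsame x (fun e => ha (e ▸ hx)))
      simp only [List.flatMap_cons, hδ, hks, List.append_assoc]
      exact (List.perm_append_comm).append_left _
    · have hc' : c ∈ ks := by
        rcases List.mem_cons.mp hc with h | h
        · exact absurd h.symm hac
        · exact h
      simp only [List.flatMap_cons, hsame a hac, List.append_assoc]
      exact (ih hnd' hc').append_left _

theorem pvAll_append (k : Nat) (hk : 1 ≤ k) (P : List (Int × Char)) (i : Int) (c : Char) :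
    (pvAll k (P ++ [(i, c)])).Perm
      (pvAll k P ++
        (if k ≤ (pvPos P c).length + 1 then
          [i - (pvPos P c ++ [i]).getD ((pvPos P c).length + 1 - k) 0 + 1] else [])) := by
  have hmap : (P ++ [(i, c)]).map (fun p => p.2) = P.map (fun p => p.2) ++ [c] := by simp
  have hof : PySem.Set.ofList ((P ++ [(i, c)]).map (fun p => p.2))
      = PySem.Set.add (PySem.Set.ofList (P.map (fun p => p.2))) c := by
    rw [hmap]; simp [PySem.Set.ofList_eq_foldl, List.foldl_append]
  have hδ : pvWins k (pvPos (P ++ [(i, c)]) c) = pvWins k (pvPos P c) ++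
      (if k ≤ (pvPos P c).length + 1 then
        [i - (pvPos P c ++ [i]).getD ((pvPos P c).length + 1 - k) 0 + 1] else []) := by
    rw [pvPos_append, if_pos rfl, pvWins_append k hk]
  have hsame : ∀ c', c' ≠ c → pvWins k (pvPos (P ++ [(i, c)]) c') = pvWins k (pvPos P c') := by
    intro c' hne; rw [pvPos_append, if_neg hne]
  by_cases hc : c ∈ PySem.Set.ofList (P.map (fun p => p.2))
  · unfold pvAll
    rw [hof, PySem.Set.add_of_mem hc]
    exact pv_flatMap_perm _ (PySem.Set.nodup_ofList _) _ _ c hc hsame _ hδ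
  · have hpos : pvPos P c = [] :=
      pvPos_nil_of_not_mem P c (fun h => hc ((PySem.Set.mem_ofList _ _).mpr h))
    have hwnil : pvWins k [] = [] := by
      have : 0 + 1 - k = 0 := by omega
      simp [pvWins, this]
    unfold pvAll
    rw [hof, PySem.Set.add_of_not_mem hc, List.flatMap_append]
    rw [List.flatMap_congr (fun x hx => hsame x (fun e => hc (e ▸ hx)))]
    simp only [List.flatMap_cons, List.flatMap_nil, List.append_nil]
    rw [hδ, hpos, hwnil, List.nil_append]

-- min/max folding is invariant under permutation of the window lengths
theorem pvG_foldl_perm {l₁ l₂ : List Int} (h : l₁.Perm l₂) (b : Int × Int) :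
    l₁.foldl pvG b = l₂.foldl pvG b := by
  letI : RightCommutative pvG :=
    ⟨by intro b a a'; simp [pvG, min_assoc, max_assoc, min_comm a a', max_comm a a']⟩
  exact h.foldl_eq b

-- B's loop invariant: the dict holds each character's last k positions, and the running
-- (min, max) pair is the pvG-fold of all window lengths recorded so far.
theorem pvB_invariant (K : Int) (k : Nat) (hKk : K = (k : Int)) (hk : 1 ≤ k)
    (P : List (Int × Char)) :
    (∀ c, (P.foldl (pvStepB K) (PySem.Dict.empty, 10001, 0)).1.getD c [] = pvLastk k (pvPos P c)) ∧
    (P.foldl (pvStepB K) (PySem.Dict.empty, 10001, 0)).2 = (pvAll k P).foldl pvG (10001, 0) := by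
  induction P using List.reverseRecOn with
  | nil =>
    constructor
    · intro c; simp [pvPos, pvLastk, PySem.Dict.getD_empty]
    · simp [pvAll]
  | append_singleton P p ih =>
    obtain ⟨i, c⟩ := p
    obtain ⟨ihd, ihv⟩ := ih
    rw [List.foldl_append, List.foldl_cons, List.foldl_nil]
    set s := P.foldl (pvStepB K) (PySem.Dict.empty, 10001, 0) with hs
    have hw0 : s.1.getD c [] ++ [i] = pvLastk k (pvPos P c) ++ [i] := by rw [ihd]
    have hweq : (if K < ((s.1.getD c [] ++ [i]).length : Int) then (s.1.getD c [] ++ [i]).tail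
        else s.1.getD c [] ++ [i]) = pvLastk k (pvPos P c ++ [i]) := by
      rw [hw0, hKk]; exact pvLastk_append k hk (pvPos P c) i
    set m := (pvPos P c).length with hm
    have hlenw : (pvLastk k (pvPos P c ++ [i])).length = (m + 1) - ((m + 1) - k) := by
      simp [pvLastk]
      omega
    have hcond : ((pvLastk k (pvPos P c ++ [i])).length : Int) = K ↔ k ≤ m + 1 := by
      rw [hKk, hlenw]
      constructor
      · intro h
        have := Nat.cast_inj.mp h
        omega
      · intro h
        have : (m + 1) - ((m + 1) - k) = k := by omega
        rw [this]
    have hdict : ∀ c', ((s.1.insert c (pvLastk k (pvPos P c ++ [i]))).getD c' []) =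
        pvLastk k (pvPos (P ++ [(i, c)]) c') := by
      intro c'
      rw [PySem.Dict.getD_insert, pvPos_append]
      by_cases h : c' = c
      · simp [h]
      · simp [h, ihd c']
    by_cases hcomp : k ≤ m + 1
    · -- a window completes: its length is the one new pvAll element
      have hx : PySem.List.pyGetD (pvLastk k (pvPos P c ++ [i])) 0 0 =
          (pvPos P c ++ [i]).getD (m + 1 - k) 0 := by
        rw [PySem.List.pyGetD_zero]
        simp only [pvLastk, List.getD, List.getElem?_drop, List.length_append,
          List.length_cons, List.length_nil]
        rw [hm]
        norm_num
      set x := i - (pvPos P c ++ [i]).getD (m + 1 - k) 0 + 1 with hxdef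
      have hperm : (pvAll k (P ++ [(i, c)])).Perm (pvAll k P ++ [x]) := by
        have := pvAll_append k hk P i c
        rwa [if_pos hcomp] at this
      constructor
      · intro c'
        simp only [pvStepB, hweq]
        rw [if_pos (hcond.mpr hcomp)]
        exact hdict c'
      · simp only [pvStepB, hweq]
        rw [if_pos (hcond.mpr hcomp)]
        have hfold : (pvAll k (P ++ [(i, c)])).foldl pvG (10001, 0)
            = pvG ((pvAll k P).foldl pvG (10001, 0)) x := by
          rw [pvG_foldl_perm hperm, List.foldl_append, List.foldl_cons, List.foldl_nil]
        rw [hfold, ← ihv, hx, ← hxdef]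
        simp only [pvG, Prod.mk.injEq]
        constructor
        · simp only [min_def]; split_ifs <;> omega
        · simp only [max_def]; split_ifs <;> omega
    · -- no window completes: dict updated, running pair unchanged
      have hperm : (pvAll k (P ++ [(i, c)])).Perm (pvAll k P) := by
        have := pvAll_append k hk P i c
        rwa [if_neg hcomp, List.append_nil] at this
      constructor
      · intro c'
        simp only [pvStepB, hweq]
        rw [if_neg (fun h => hcomp (hcond.mp h))]
        exact hdict c'
      · simp only [pvStepB, hweq]
        rw [if_neg (fun h => hcomp (hcond.mp h))]
        rw [pvG_foldl_perm hperm, ihv]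

-- A's inner loop over one position list is the pvG-fold of its window lengths
theorem pvInner (K : Int) (k : Nat) (hKk : K = (k : Int)) (hk : 1 ≤ k)
    (v : List Int) (tf : Int × Int) :
    (if (v.length : Int) < K then tf
     else
       (PySem.List.pyRange 0 ((v.length : Int) - K + 1) 1).foldl
         (fun tf i =>
           (min tf.1 (PySem.List.pyGetD v (i + K - 1) 0 - PySem.List.pyGetD v i 0 + 1),
            max (PySem.List.pyGetD v (i + K - 1) 0 - PySem.List.pyGetD v i 0 + 1) tf.2))
         tf) = (pvWins k v).foldl pvG tf := by
  by_cases hlt : (v.length : Int) < K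
  · have h0 : v.length + 1 - k = 0 := by omega
    simp [hlt, pvWins, h0]
  · rw [if_neg hlt]
    have hn : ((v.length : Int) - K + 1 - 0).toNat = v.length + 1 - k := by omega
    rw [PySem.List.pyRange_one, hn]
    unfold pvWins
    rw [List.foldl_map, List.foldl_map]
    apply PySem.List.foldl_congr_mem
    intro acc j hj
    rw [List.mem_range] at hj
    have e1 : (0 : Int) + (j : Nat) + K - 1 = ((j + k - 1 : Nat) : Int) := by omega
    have e2 : (0 : Int) + (j : Nat) = ((j : Nat) : Int) := by omega
    rw [e1, e2, PySem.List.pyGetD_natCast, PySem.List.pyGetD_natCast]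
    simp only [pvG, List.getD]
    rw [max_comm]

-- A's nested fold over the finished position table equals the pvG-fold of pvAll
theorem pvA_fold (K : Int) (k : Nat) (hKk : K = (k : Int)) (hk : 1 ≤ k)
    (P : List (Int × Char)) :
    (((P.foldl (fun (d : PySem.Dict Char (List Int)) p => d.modify p.2 [] (fun v => v ++ [p.1]))
        PySem.Dict.empty).values).foldl
      (fun tf value =>
        if (value.length : Int) < K then tf
        else
          (PySem.List.pyRange 0 ((value.length : Int) - K + 1) 1).foldl
            (fun tf i =>
              (min tf.1 (PySem.List.pyGetD value (i + K - 1) 0 - PySem.List.pyGetD value i 0 + 1),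
               max (PySem.List.pyGetD value (i + K - 1) 0 - PySem.List.pyGetD value i 0 + 1) tf.2))
            tf)
      ((10001 : Int), (0 : Int))) = (pvAll k P).foldl pvG (10001, 0) := by
  set dA := P.foldl (fun (d : PySem.Dict Char (List Int)) p => d.modify p.2 [] (fun v => v ++ [p.1]))
      PySem.Dict.empty with hdA
  have hgetD : ∀ c, dA.getD c [] = pvPos P c := by
    intro c
    have swap_eq : dA = (P.map Prod.swap).foldl
        (fun (d : PySem.Dict Char (List Int)) p => d.modify p.1 [] (fun v => v ++ [p.2]))
        PySem.Dict.empty := by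
      rw [hdA, List.foldl_map]
      rfl
    rw [swap_eq, PySem.Dict.getD_foldl_modify_append]
    simp only [PySem.Dict.getD_empty, List.nil_append, List.filter_map, List.map_map]
    simp only [pvPos, Function.comp_def, Prod.fst_swap, Prod.snd_swap]
  have hnodup : dA.keys.Nodup := by
    rw [hdA]
    exact PySem.Dict.nodup_keys_foldl_modify_key P (fun p => p.2) []
      (fun _ p v => v ++ [p.1]) PySem.Dict.empty (by simp)
  have hkeys : dA.keys = PySem.Set.ofList (P.map (fun p => p.2)) := by
    rw [hdA]
    rw [PySem.Dict.keys_foldl_modify_key P (fun p => p.2) [] (fun _ p v => v ++ [p.1])]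
    simp [PySem.Set.ofList_eq_foldl, PySem.Set.update]
  have hvals : dA.values = dA.keys.map (fun c => pvPos P c) := by
    rw [PySem.Dict.values_eq_map_keys dA hnodup []]
    exact List.map_congr_left (fun c _ => hgetD c)
  rw [hvals, List.foldl_map]
  rw [PySem.List.foldl_congr_mem _ _ (fun tf c => (pvWins k (pvPos P c)).foldl pvG tf) _
      (fun acc c _ => pvInner K k hKk hk (pvPos P c) acc)]
  rw [hkeys]
  unfold pvAll
  rw [List.flatMap_def, List.foldl_flatten, List.foldl_map]

-- ===== VERDICT (by name: the statement is the Claim_ definition above) =====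
theorem solution_spec : Claim_equal_solution := by
  intro W K _ hpre
  unfold Spec_solution
  rcases hpre with hW | hK
  · subst hW; rfl
  · have hKk : K = (K.toNat : Int) := by omega
    have hk : 1 ≤ K.toNat := by omega
    simp only [solution, solution_alt]
    rw [pvA_fold K K.toNat hKk hk]
    rw [show (fun (s : PySem.Dict Char (List Int) × Int × Int) (p : Int × Char) =>
        let w0 := s.1.getD p.2 [] ++ [p.1]
        let w := if K < (w0.length : Int) then w0.tail else w0
        if (w.length : Int) = K then
          (s.1.insert p.2 w,
           (if p.1 - PySem.List.pyGetD w 0 0 + 1 < s.2.1 then p.1 - PySem.List.pyGetD w 0 0 + 1 else s.2.1),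
           (if s.2.2 < p.1 - PySem.List.pyGetD w 0 0 + 1 then p.1 - PySem.List.pyGetD w 0 0 + 1 else s.2.2))
        else (s.1.insert p.2 w, s.2.1, s.2.2)) = pvStepB K from rfl]
    rw [(pvB_invariant K K.toNat hKk hk (PySem.List.enumerate W.toList 0)).2]
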